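-- pv_equiv track=rewrite | github.com/GuudMan/Algorithm | 题目/移动字符串位置.py | move_char
-- ===== SOURCE A (Python) =====
-- def move_char(str_list):
--     pos = 0
--
--     for i in range(int(len(str_list))):
--         if str_list[i] == '*':
--             pos = i
--             if pos > 0:
--                 for j in range(pos, 1, -1):
--                     temp = str_list[pos]
--                     str_list[pos] = str_list[pos-1]
--                     str_list[pos - 1] = temp
--                     pos -= 1
--     return str_list
-- ===== SOURCE B (Python) =====
-- def move_char(str_list):
--     # Single pass over the tail: position 0 is never disturbed by A,
--     # every '*' at index >= 1 moves before the non-star tail elements.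
--     if str_list:
--         tail = str_list[1:]
--         stars = [s for s in tail if s == '*']
--         rest = [s for s in tail if s != '*']
--         str_list[1:] = stars + rest  # mutate in place like A
--     return str_list
-- ===== Notes on version B (the rewrite author's own statement) =====
-- stated objective: simpler
-- what changed: Replaces the bubble-every-star-leftward nested loops with a single stable partition of the tail (stars first, then the remaining elements in order), keeping index 0 fixed as A does.
import Mathlib
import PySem

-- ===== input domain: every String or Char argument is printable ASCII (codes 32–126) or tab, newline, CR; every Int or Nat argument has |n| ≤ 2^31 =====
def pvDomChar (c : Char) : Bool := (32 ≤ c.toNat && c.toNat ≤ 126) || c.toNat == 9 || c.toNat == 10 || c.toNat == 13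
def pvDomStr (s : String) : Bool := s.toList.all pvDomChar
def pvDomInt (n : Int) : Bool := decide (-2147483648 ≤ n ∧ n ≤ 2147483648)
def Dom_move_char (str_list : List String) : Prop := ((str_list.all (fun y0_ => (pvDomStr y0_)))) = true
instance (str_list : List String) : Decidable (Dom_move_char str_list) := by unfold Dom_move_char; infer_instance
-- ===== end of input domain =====

-- B replaces A's bubble-every-star-leftward nested loops by one stable partition
-- of the tail (stars first, rest after in order), keeping index 0 fixed; the
-- equivalence proved is about the RETURN value only (A and B both mutate the
-- argument in Python; the ports are pure).


-- ===== PORT A =====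
-- the three-assignment swap of str_list[pos] and str_list[pos-1] (indices always in
-- range when called, so getD is exact)
def pySwapA (l : List String) (pos : Nat) : List String :=
  let temp := l.getD pos ""
  let l1 := l.set pos (l.getD (pos - 1) "")
  l1.set (pos - 1) temp

-- inner loop 'for j in range(pos, 1, -1)': swap pos,pos-1 and decrement, while pos > 1
def innerA (l : List String) (pos : Nat) : List String :=
  if pos > 1 then innerA (pySwapA l pos) (pos - 1) else l

def move_char (str_list : List String) : List String :=
  (List.range str_list.length).foldl
    (fun l i =>
      if l.getD i "" == "*" then
        if i > 0 then innerA l i else l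
      else l)
    str_list

-- ===== PORT B =====
def move_char_alt (str_list : List String) : List String :=
  match str_list with
  | [] => []
  | h :: tail => h :: (tail.filter (· == "*") ++ tail.filter (· != "*"))

-- ===== PRECONDITION & SPEC =====
def Spec_move_char (str_list : List String) (out : List String) : Prop := out = move_char_alt str_list
instance (str_list : List String) (out : List String) : Decidable (Spec_move_char str_list out) := by unfold Spec_move_char; infer_instance

-- ===== CLAIM (what is proved, stated in full; the proofs are below) =====
def Claim_equal_move_char : Prop := ∀ (str_list : List String), Dom_move_char str_list → Spec_move_char str_list (move_char str_list)

-- ===== LEMMAS AND PROOFS =====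

theorem pv_getD_append_cons (C : List String) (y : String) (rest : List String) (d : String) :
    (C ++ y :: rest).getD C.length d = y := by
  induction C with
  | nil => rfl
  | cons c C ih => simpa using ih

theorem pv_set_append_cons (C : List String) (y z : String) (rest : List String) :
    (C ++ y :: rest).set C.length z = C ++ z :: rest := by
  induction C with
  | nil => rfl
  | cons c C ih => simpa using ih

theorem pv_swap_eq (C : List String) (p x : String) (rest : List String) :
    pySwapA (C ++ p :: x :: rest) (C.length + 1) = C ++ x :: p :: rest := by
  unfold pySwapA
  have h1 : (C ++ p :: x :: rest).getD (C.length + 1) "" = x := by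
    have := pv_getD_append_cons (C ++ [p]) x rest ""
    simpa using this
  have h2 : (C ++ p :: x :: rest).getD (C.length + 1 - 1) "" = p := by
    simpa using pv_getD_append_cons C p (x :: rest) ""
  rw [h1, h2]
  have h3 : (C ++ p :: x :: rest).set (C.length + 1) p = C ++ p :: p :: rest := by
    have := pv_set_append_cons (C ++ [p]) x p rest
    simpa using this
  rw [h3]
  simpa using pv_set_append_cons C p x (p :: rest)

theorem pv_bubble (P : List String) (h x : String) (rest : List String) :
    innerA (h :: P ++ x :: rest) (P.length + 1) = h :: x :: P ++ rest := by
  induction P using List.reverseRecOn generalizing rest with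
  | nil => simp [innerA]
  | append_singleton P' p ih =>
    have hlen : (P' ++ [p]).length + 1 = P'.length + 1 + 1 := by simp
    rw [hlen]
    rw [innerA]
    simp only [Nat.lt_irrefl, if_pos (by omega : P'.length + 1 + 1 > 1)]
    have hl : h :: (P' ++ [p]) ++ x :: rest = (h :: P') ++ p :: x :: rest := by simp
    have hsw : pySwapA (h :: (P' ++ [p]) ++ x :: rest) (P'.length + 1 + 1) =
        (h :: P') ++ x :: p :: rest := by
      rw [hl]
      have := pv_swap_eq (h :: P') p x rest
      simpa using this
    rw [show P'.length + 1 + 1 - 1 = P'.length + 1 from rfl, hsw]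
    have := ih (p :: rest)
    simp only [List.cons_append] at this ⊢
    rw [this]
    simp

theorem pv_all_star_cons (S : List String) (hS : ∀ s ∈ S, s = "*") :
    "*" :: S = S ++ ["*"] := by
  induction S with
  | nil => rfl
  | cons a S ih =>
    have ha : a = "*" := hS a (by simp)
    have := ih (fun s hs => hS s (by simp [hs]))
    rw [ha, List.cons_append, ← this]

theorem pv_filter_star_all (t : List String) :
    ∀ s ∈ t.filter (· == "*"), s = "*" := by
  intro s hs
  have := List.of_mem_filter hs
  simpa [beq_iff_eq] using this

theorem pv_filter_len (t : List String) :
    (t.filter (· == "*")).length + (t.filter (· != "*")).length = t.length := by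
  induction t with
  | nil => rfl
  | cons a t ih =>
    by_cases h : a = "*" <;> simp [List.filter_cons, h] <;> omega

theorem pv_main (h : String) (t : List String) (k : Nat) (hk : k ≤ t.length) :
    (List.range (k + 1)).foldl
      (fun l i =>
        if l.getD i "" == "*" then
          if i > 0 then innerA l i else l
        else l) (h :: t)
    = h :: ((t.take k).filter (· == "*") ++ ((t.take k).filter (· != "*") ++ t.drop k)) := by
  induction k with
  | zero =>
    simp only [List.range_succ, List.range_zero, List.nil_append, List.foldl_cons,
      List.foldl_nil, List.take_zero, List.drop_zero, List.filter_nil, List.getD_cons_zero]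
    split <;> simp
  | succ k ih =>
    have hk' : k ≤ t.length := Nat.le_of_succ_le hk
    have hklt : k < t.length := hk
    rw [List.range_succ, List.foldl_append, ih hk']
    set S := (t.take k).filter (· == "*") with hSdef
    set N := (t.take k).filter (· != "*") with hNdef
    have hlenP : (S ++ N).length = k := by
      have := pv_filter_len (t.take k)
      simp only [List.length_append, ← hSdef, ← hNdef] at this ⊢
      rw [this]; exact List.length_take_of_le hk'
    have hdrop : t.drop k = t[k] :: t.drop (k + 1) := List.drop_eq_getElem_cons hklt
    set x := t[k] with hxdef
    have hstate : h :: (S ++ (N ++ t.drop k)) = h :: ((S ++ N) ++ x :: t.drop (k + 1)) := by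
      rw [hdrop]; simp
    rw [hstate]
    have htake : t.take (k + 1) = t.take k ++ [x] := by
      rw [List.take_succ]
      simp [List.getElem?_eq_getElem hklt, ← hxdef]
    have hget : (h :: ((S ++ N) ++ x :: t.drop (k + 1))).getD (k + 1) "" = x := by
      have base := pv_getD_append_cons (S ++ N) x (t.drop (k + 1)) ""
      rw [hlenP] at base
      simpa using base
    simp only [List.foldl_cons, List.foldl_nil]
    rw [hget]
    by_cases hx : x = "*"
    · have hcond : (x == "*") = true := by simp [hx]
      rw [hcond, if_pos rfl, if_pos (Nat.succ_pos k)]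
      have hb : innerA (h :: ((S ++ N) ++ x :: t.drop (k + 1))) (k + 1) =
          h :: x :: (S ++ N) ++ t.drop (k + 1) := by
        have := pv_bubble (S ++ N) h x (t.drop (k + 1))
        rw [hlenP] at this
        simpa using this
      rw [hb, htake]
      have hstar : "*" :: S = S ++ ["*"] := pv_all_star_cons S (pv_filter_star_all _)
      simp only [List.filter_append, ← hSdef, ← hNdef, List.filter_cons, List.filter_nil, hx]
      norm_num
      rw [← List.cons_append, hstar]
      simp
    · have hxb : (x == "*") = false := by simpa [beq_iff_eq] using hx
      rw [hxb]
      simp only [Bool.false_eq_true, if_false]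
      rw [htake]
      simp only [List.filter_append, ← hSdef, ← hNdef, List.filter_cons, List.filter_nil, hxb]
      have hxne : (x != "*") = true := by simp [bne, hxb]
      simp [hxne]

theorem move_char_eq (l : List String) : move_char l = move_char_alt l := by
  cases l with
  | nil => rfl
  | cons h t =>
    unfold move_char move_char_alt
    have := pv_main h t t.length (le_refl _)
    simpa using this

-- ===== VERDICT (by name: the statement is the Claim_ definition above) =====
theorem move_char_spec : Claim_equal_move_char := by
  intro l _
  unfold Spec_move_char
  exact move_char_eq l
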